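-- pv_equiv track=rewrite | github.com/Jamquelet/git_practice | py102/subcadena_en_comun.py | twoString
-- ===== SOURCE A (Python) =====
-- def twoString(s1, s2):
--     d = {}
--     for c in s1: #para cada caracter en la cadena
--         d[c] = d.get(c,0) +1 #a esta pocision o a este caracter, cuantas veces ya la vi antes si ya existe dame el conteo de veces que lo vi sino retorna 0 y aumentale 1, estoy contando cuantas veces vi este caracter
--
--     for c in s2:
--         if d.get(c,0) > 0:#si este caracter ya lo vi antes, debe ser 0 caso contrario dame 0
--             return "YES"
--
--     return "NO"
-- ===== SOURCE B (Python) =====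
-- def twoString(s1, s2):
--     a = sorted(s1)
--     b = sorted(s2)
--     i = j = 0
--     while i < len(a) and j < len(b):
--         if a[i] == b[j]:
--             return "YES"
--         if a[i] < b[j]:
--             i += 1
--         else:
--             j += 1
--     return "NO"
-- ===== Notes on version B (the rewrite author's own statement) =====
-- stated objective: alternative
-- what changed: Replaces A's frequency-dict build plus membership scan with a sort-then-merge algorithm: sort both strings and advance two pointers over the sorted lists, answering YES at the first equal pair.
import Mathlib
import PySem

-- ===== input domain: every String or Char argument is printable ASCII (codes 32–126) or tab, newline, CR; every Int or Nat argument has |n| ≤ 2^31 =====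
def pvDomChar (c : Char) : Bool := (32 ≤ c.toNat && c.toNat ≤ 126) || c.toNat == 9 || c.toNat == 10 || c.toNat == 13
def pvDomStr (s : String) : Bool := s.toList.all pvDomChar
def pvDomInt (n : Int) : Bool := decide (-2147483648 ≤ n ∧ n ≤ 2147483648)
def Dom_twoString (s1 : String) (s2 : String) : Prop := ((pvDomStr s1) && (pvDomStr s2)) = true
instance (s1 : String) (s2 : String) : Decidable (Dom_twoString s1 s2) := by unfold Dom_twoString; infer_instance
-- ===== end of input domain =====

-- B replaces A's frequency-dict build + membership scan with sort-then-merge: sort both strings and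
-- run a two-pointer merge scan over the sorted lists (objective: alternative; no speed claim).


-- ===== PORT A =====
-- scan of s2 with early return "YES"
def twoStringScan (d : PySem.Dict Char Int) : List Char → String
  | [] => "NO"
  | c :: rest => if d.getD c 0 > 0 then "YES" else twoStringScan d rest

def twoString (s1 : String) (s2 : String) : String :=
  let d := s1.toList.foldl (fun d c => d.insert c (d.getD c 0 + 1)) PySem.Dict.empty
  twoStringScan d s2.toList

-- ===== PORT B =====
-- the two-pointer while-loop of Source B as structural recursion on the two sorted lists
def mergeScan : List Char → List Char → String
  | [], _ => "NO"
  | _ :: _, [] => "NO"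
  | a :: as, b :: bs =>
    if a = b then "YES"
    else if a < b then mergeScan as (b :: bs)
    else mergeScan (a :: as) bs

def twoString_alt (s1 : String) (s2 : String) : String :=
  mergeScan (PySem.List.sorted s1.toList (fun c => c) false)
            (PySem.List.sorted s2.toList (fun c => c) false)

-- ===== PRECONDITION & SPEC =====
def Spec_twoString (s1 : String) (s2 : String) (out : String) : Prop := out = twoString_alt s1 s2
instance (s1 : String) (s2 : String) (out : String) : Decidable (Spec_twoString s1 s2 out) := by unfold Spec_twoString; infer_instance

-- ===== CLAIM =====
def Claim_equal_twoString : Prop := ∀ (s1 : String) (s2 : String), Dom_twoString s1 s2 → Spec_twoString s1 s2 (twoString s1 s2)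

-- ===== LEMMAS AND PROOFS =====
lemma scan_counter (l1 l2 : List Char) :
    twoStringScan (PySem.Dict.counter l1) l2 =
      if l2.any (fun c => decide (c ∈ l1)) then "YES" else "NO" := by
  induction l2 with
  | nil => rfl
  | cons c rest ih =>
    simp only [twoStringScan, PySem.Dict.getD_counter, List.any_cons, ih]
    by_cases h : c ∈ l1
    · simp [h, List.count_pos_iff.mpr h]
    · simp [h, List.count_eq_zero_of_not_mem h]

lemma mergeScan_sorted (la lb : List Char) :
    la.Pairwise (· ≤ ·) → lb.Pairwise (· ≤ ·) →
    mergeScan la lb = if lb.any (fun c => decide (c ∈ la)) then "YES" else "NO" := by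
  induction la, lb using mergeScan.induct with
  | case1 lb => intro _ _; simp [mergeScan]
  | case2 a as => intro _ _; simp [mergeScan]
  | case3 as b bs =>
    intro _ _
    simp [mergeScan]
  | case4 a as b bs hab hlt ih =>
    intro ha hb
    rcases List.pairwise_cons.mp ha with ⟨haas, has⟩
    have hcond : ((b :: bs).any fun c => decide (c ∈ as))
        = ((b :: bs).any fun c => decide (c ∈ a :: as)) := by
      rw [Bool.eq_iff_iff]
      simp only [List.any_eq_true, decide_eq_true_eq]
      constructor
      · rintro ⟨c, hc, hcas⟩; exact ⟨c, hc, List.mem_cons_of_mem a hcas⟩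
      · rintro ⟨c, hc, hcaas⟩
        rcases List.mem_cons.mp hcaas with hca | hcas
        · exfalso
          subst hca
          rcases List.mem_cons.mp hc with hcb | hcbs
          · exact hab hcb
          · exact absurd ((List.pairwise_cons.mp hb).1 c hcbs) (not_le.mpr hlt)
        · exact ⟨c, hc, hcas⟩
    rw [mergeScan, if_neg hab, if_pos hlt, ih has hb, hcond]
  | case5 a as b bs hab hlt ih =>
    intro ha hb
    rcases List.pairwise_cons.mp ha with ⟨haas, has⟩
    rcases List.pairwise_cons.mp hb with ⟨hbbs, hbs⟩
    have hba : b < a := lt_of_le_of_ne (not_lt.mp hlt) (Ne.symm hab)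
    have hcond : (bs.any fun c => decide (c ∈ a :: as))
        = ((b :: bs).any fun c => decide (c ∈ a :: as)) := by
      rw [Bool.eq_iff_iff]
      simp only [List.any_cons, List.any_eq_true, decide_eq_true_eq, Bool.or_eq_true]
      constructor
      · exact Or.inr
      · rintro (h | h)
        · exfalso
          rcases List.mem_cons.mp h with rfl | hbas
          · exact hab rfl
          · exact absurd (haas b hbas) (not_le.mpr hba)
        · exact h
    rw [mergeScan, if_neg hab, if_neg hlt, ih ha hbs, hcond]

lemma any_mem_sorted (l1 l2 : List Char) :
    ((PySem.List.sorted l2 (fun c => c) false).any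
        (fun c => decide (c ∈ PySem.List.sorted l1 (fun c => c) false)))
      = l2.any (fun c => decide (c ∈ l1)) := by
  rw [Bool.eq_iff_iff]
  simp only [List.any_eq_true, decide_eq_true_eq,
    PySem.List.mem_sorted]

-- ===== VERDICT =====
theorem twoString_spec : Claim_equal_twoString := by
  intro s1 s2 _
  unfold Spec_twoString twoString twoString_alt
  rw [PySem.Dict.foldl_insert_getD_add_one_eq_counter, scan_counter,
      mergeScan_sorted _ _ (PySem.List.sorted_pairwise _ _) (PySem.List.sorted_pairwise _ _),
      any_mem_sorted]
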